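-- pv_equiv track=rewrite | github.com/le-n-qui/coding-challenges | reverse_digits_in_pairs.py | reverse_digits_in_pairs
-- ===== SOURCE A (Python) =====
-- def reverse_digits_in_pairs(number):
-- 	# Need a stack
-- 	stack = []
-- 	# Need a result variable
-- 	result = 0
-- 	# With a while loop, get each digit of integer starting at the last one
-- 	while number:
-- 		# Keep digits in stack
-- 		stack.append(number % 10) # modulo 10 gives last digit
-- 		number //= 10 # Get the integer without last digit
-- 	# While stack is not empty, do two pop operations
-- 	while stack:
-- 		first_digit = stack.pop()
-- 		# Need a test condition for the second pop because stack may have only one item left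
-- 		if stack:
-- 			second_digit = stack.pop()
-- 			# Create reversed pairs of of digits and add it to result
-- 			result = (result * 100) + (second_digit * 10) + first_digit
-- 		else:
-- 			# because second digit does not exist
-- 			# multiply result by 10 and add first digit
-- 			result = (result * 10) + first_digit
--
-- 	# Return result
-- 	return result
-- ===== SOURCE B (Python) =====
-- def reverse_digits_in_pairs(number):
--     # Count the decimal digits of the number
--     k = 1
--     t = number
--     while t >= 10:
--         t //= 10
--         k += 1
--
--     # Swap the leading pair of a k-digit block and recurse on the rest
--     def swap(r, k):
--         if k <= 1:
--             return r
--         p = 10 ** (k - 2)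
--         a, b = divmod(r // p, 10)
--         return (b * 10 + a) * p + swap(r % p, k - 2)
--
--     return swap(number, k)
-- ===== Notes on version B (the rewrite author's own statement) =====
-- stated objective: alternative
-- what changed: Replaced A's build-a-digit-stack loop plus pop-two-at-a-time reassembly loop with a digit-count loop followed by a top-down divmod recursion that swaps the leading pair of each 10^k block directly.
import Mathlib
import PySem

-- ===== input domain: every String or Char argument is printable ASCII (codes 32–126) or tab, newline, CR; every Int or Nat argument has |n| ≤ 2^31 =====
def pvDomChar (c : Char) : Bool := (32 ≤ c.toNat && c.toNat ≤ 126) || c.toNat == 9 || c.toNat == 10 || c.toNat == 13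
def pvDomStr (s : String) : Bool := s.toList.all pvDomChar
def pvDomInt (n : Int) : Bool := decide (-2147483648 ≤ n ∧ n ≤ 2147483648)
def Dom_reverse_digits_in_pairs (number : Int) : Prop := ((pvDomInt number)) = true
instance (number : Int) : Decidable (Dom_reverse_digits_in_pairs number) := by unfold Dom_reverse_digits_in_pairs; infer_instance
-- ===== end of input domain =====

-- B swaps the leading digit pair of each 10^k block by divmod recursion from the most significant
-- end, replacing A's build-a-stack-then-consume-it two-loop scheme; objective: alternative structure.

-- ===== PORT A =====
-- first while loop: collect digits least-significant first (fuel only makes the loop total;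
-- number.natAbs + 1 steps always suffice on the inputs where Python terminates, i.e. 0 ≤ number)
def pvDigitsA : Nat → Int → List Int
  | 0, _ => []
  | fuel + 1, n =>
    if n = 0 then []
    else PySem.Int.mod n 10 :: pvDigitsA fuel (PySem.Int.floordiv n 10)

-- second while loop: pop one or two digits off the stack per iteration
def pvPopLoop (stack : List Int) (result : Int) : Int :=
  match h : PySem.List.pop? stack with
  | none => result
  | some (first_digit, rest) =>
    match h2 : PySem.List.pop? rest with
    | none => result * 10 + first_digit
    | some (second_digit, rest2) =>
      pvPopLoop rest2 (result * 100 + second_digit * 10 + first_digit)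
termination_by stack.length
decreasing_by
  have l1 := PySem.List.length_of_pop?_eq_some _ h
  have l2 := PySem.List.length_of_pop?_eq_some _ h2
  simp_all; omega

def reverse_digits_in_pairs (number : Int) : Int :=
  pvPopLoop (pvDigitsA (number.natAbs + 1) number) 0

-- ===== PORT B =====
-- the digit-count while-loop of Source B, returning k - 1 (one less than the digit count)
def pvCount (t : Int) : Int :=
  if h : 10 ≤ t then pvCount (PySem.Int.floordiv t 10) + 1 else 0
termination_by t.toNat
decreasing_by
  rw [PySem.Int.floordiv_eq_ediv_of_pos (by omega : (0:Int) < 10)]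
  omega

-- the recursive helper swap(r, k) of Source B
def pvSwap (r : Int) (k : Int) : Int :=
  if h : k ≤ 1 then r
  else
    let p : Int := 10 ^ (k - 2).toNat
    let a := PySem.Int.floordiv (PySem.Int.floordiv r p) 10
    let b := PySem.Int.mod (PySem.Int.floordiv r p) 10
    (b * 10 + a) * p + pvSwap (PySem.Int.mod r p) (k - 2)
termination_by k.toNat
decreasing_by omega

def reverse_digits_in_pairs_alt (number : Int) : Int :=
  pvSwap number (pvCount number + 1)

-- ===== PRECONDITION & SPEC =====
-- Pre_ excludes negative numbers: there A's first while loop never terminates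
-- (number //= 10 stops at -1, which is truthy), so Python A diverges.
def Pre_reverse_digits_in_pairs (number : Int) : Prop := 0 ≤ number
instance (number : Int) : Decidable (Pre_reverse_digits_in_pairs number) := by
  unfold Pre_reverse_digits_in_pairs; infer_instance

def pvWitness_reverse_digits_in_pairs : Int := 12345

def Spec_reverse_digits_in_pairs (number : Int) (out : Int) : Prop := out = reverse_digits_in_pairs_alt number
instance (number : Int) (out : Int) : Decidable (Spec_reverse_digits_in_pairs number out) := by unfold Spec_reverse_digits_in_pairs; infer_instance

-- ===== CLAIM (what is proved, stated in full; the proofs are below) =====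
def Claim_equal_reverse_digits_in_pairs : Prop := ∀ (number : Int), Dom_reverse_digits_in_pairs number → Pre_reverse_digits_in_pairs number → Spec_reverse_digits_in_pairs number (reverse_digits_in_pairs number)

-- ===== LEMMAS AND PROOFS =====

-- A's stack is the little-endian digit list
theorem pvDigitsA_eq (f : Nat) : ∀ (m : Nat), m < f →
    pvDigitsA f (m : Int) = (Nat.digits 10 m).map (fun d : Nat => (d : Int)) := by
  induction f with
  | zero => intro m hm; omega
  | succ f ih =>
    intro m hm
    by_cases h0 : m = 0
    · subst h0; simp [pvDigitsA]
    · have hpos : 0 < m := Nat.pos_of_ne_zero h0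
      rw [Nat.digits_def' (by norm_num : 1 < 10) hpos]
      have hlt : m / 10 < f := lt_of_lt_of_le (Nat.div_lt_self hpos (by norm_num)) (by omega)
      have e1 : PySem.Int.mod (m : Int) 10 = ((m % 10 : Nat) : Int) := by
        exact_mod_cast PySem.Int.mod_natCast m 10
      have e2 : PySem.Int.floordiv (m : Int) 10 = ((m / 10 : Nat) : Int) := by
        exact_mod_cast PySem.Int.floordiv_natCast m 10
      simp only [pvDigitsA, if_neg (by exact_mod_cast h0 : ¬ ((m : Int) = 0)), e1, e2]
      rw [ih _ hlt]
      simp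

-- the pair-consuming fold over the big-endian digit list (proof-only abstraction of A's second loop)
def pvFoldPairs : List Int → Int → Int
  | [], r => r
  | [a], r => r * 10 + a
  | a :: b :: rest, r => pvFoldPairs rest (r * 100 + b * 10 + a)

theorem pvPopLoop_eq_foldPairs : ∀ (n : Nat) (s : List Int), s.length = n →
    ∀ r, pvPopLoop s r = pvFoldPairs s.reverse r := by
  intro n
  induction n using Nat.strong_induction_on with
  | _ n ih =>
    intro s hs r
    rcases List.eq_nil_or_concat s with h | ⟨t, a, h⟩
    · subst h; simp [pvPopLoop, PySem.List.pop?, PySem.List.pyIdx?, pvFoldPairs]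
    · subst h
      rw [List.concat_eq_append] at *
      rw [pvPopLoop]
      split
      · rename_i heq
        rw [PySem.List.pop?_last] at heq; cases heq
      · rename_i fd rest heq
        rw [PySem.List.pop?_last] at heq
        injection heq with hpair
        injection hpair with hfd hrest
        subst hfd; subst hrest
        rcases List.eq_nil_or_concat t with h2 | ⟨u, b, h2⟩
        · subst h2
          simp [PySem.List.pop?, PySem.List.pyIdx?, pvFoldPairs]
        · subst h2
          rw [List.concat_eq_append] at *
          split
          · rename_i heq2
            rw [PySem.List.pop?_last] at heq2; cases heq2
          · rename_i sd rest2 heq2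
            rw [PySem.List.pop?_last] at heq2
            injection heq2 with hpair2
            injection hpair2 with hsd hrest2
            subst hsd; subst hrest2
            have hlen : u.length = n - 2 := by simp at hs ⊢; omega
            have hn : n - 2 < n := by simp at hs; omega
            rw [ih _ hn u hlen]
            simp [pvFoldPairs]

-- big-endian value of a digit list
def pvValBE : List Int → Int
  | [] => 0
  | d :: rest => d * 10 ^ rest.length + pvValBE rest

theorem pvValBE_bounds : ∀ (L : List Int), (∀ d ∈ L, 0 ≤ d ∧ d < 10) →
    0 ≤ pvValBE L ∧ pvValBE L < 10 ^ L.length := by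
  intro L
  induction L with
  | nil => intro _; simp [pvValBE]
  | cons d rest ih =>
    intro h
    have hd := h d (by simp)
    have hr := ih (fun x hx => h x (by simp [hx]))
    have hpow : (0:Int) < 10 ^ rest.length := by positivity
    constructor
    · simp only [pvValBE]; nlinarith [hd.1, hr.1]
    · simp only [pvValBE, List.length_cons]
      have : d * 10 ^ rest.length ≤ 9 * 10 ^ rest.length := by nlinarith [hd.2]
      calc d * 10 ^ rest.length + pvValBE rest
          ≤ 9 * 10 ^ rest.length + pvValBE rest := by linarith
        _ < 9 * 10 ^ rest.length + 10 ^ rest.length := by linarith [hr.2]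
        _ = 10 ^ (rest.length + 1) := by ring

theorem pvValBE_append (xs : List Int) (d : Int) :
    pvValBE (xs ++ [d]) = 10 * pvValBE xs + d := by
  induction xs with
  | nil => simp [pvValBE]
  | cons x rest ih =>
    simp [pvValBE, ih, List.length_append]
    ring

theorem pvValBE_digits (ds : List Nat) :
    pvValBE ((ds.reverse).map (fun d : Nat => (d : Int))) = ((Nat.ofDigits 10 ds : Nat) : Int) := by
  induction ds with
  | nil => simp [pvValBE, Nat.ofDigits_nil]
  | cons d rest ih =>
    rw [List.reverse_cons, List.map_append]
    rw [List.map_singleton, pvValBE_append, ih, Nat.ofDigits_cons]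
    push_cast
    ring

-- the key correspondence: A's pair fold equals B's top-down swap recursion
theorem pvFoldPairs_eq_swap (L : List Int) (r : Int) (h : ∀ d ∈ L, 0 ≤ d ∧ d < 10) :
    pvFoldPairs L r = r * 10 ^ L.length + pvSwap (pvValBE L) (L.length : Int) := by
  revert h
  induction L, r using pvFoldPairs.induct with
  | case1 r =>
    intro _
    rw [pvSwap]
    simp [pvFoldPairs, pvValBE]
  | case2 a r =>
    intro _
    rw [pvSwap]
    simp [pvFoldPairs, pvValBE]
  | case3 a b rest r ih =>
    intro h
    have hd_a := h a (by simp)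
    have hd_b := h b (by simp)
    have hrest : ∀ d ∈ rest, 0 ≤ d ∧ d < 10 := fun d hd => h d (by simp [hd])
    have hb := pvValBE_bounds rest hrest
    have hp : (0:Int) < 10 ^ rest.length := by positivity
    rw [pvFoldPairs, ih hrest]
    have hlen : (((a :: b :: rest).length : Nat) : Int) = (rest.length : Int) + 2 := by
      simp; ring
    conv_rhs => rw [pvSwap]
    rw [hlen]
    rw [dif_neg (by omega : ¬ ((rest.length : Int) + 2 ≤ 1))]
    have htn : (((rest.length : Int) + 2) - 2).toNat = rest.length := by omega
    simp only [htn]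
    have hv : pvValBE (a :: b :: rest) = (a * 10 + b) * 10 ^ rest.length + pvValBE rest := by
      simp only [pvValBE, List.length_cons]
      ring
    have e1 : PySem.Int.floordiv (pvValBE (a :: b :: rest)) (10 ^ rest.length) = a * 10 + b := by
      rw [hv, PySem.Int.floordiv_eq_ediv_of_pos hp, add_comm, Int.add_mul_ediv_right _ _ (by omega : (10:Int) ^ rest.length ≠ 0), Int.ediv_eq_zero_of_lt hb.1 hb.2]
      omega
    have e4 : PySem.Int.mod (pvValBE (a :: b :: rest)) (10 ^ rest.length) = pvValBE rest := by
      rw [hv, PySem.Int.mod_eq_emod_of_pos hp, add_comm, Int.add_mul_emod_self_right, Int.emod_eq_of_lt hb.1 hb.2]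
    rw [e1, e4]
    have e2 : PySem.Int.floordiv (a * 10 + b) 10 = a := by
      rw [PySem.Int.floordiv_eq_ediv_of_pos (by omega : (0:Int) < 10)]
      omega
    have e3 : PySem.Int.mod (a * 10 + b) 10 = b := by
      rw [PySem.Int.mod_eq_emod_of_pos (by omega : (0:Int) < 10)]
      omega
    rw [e2, e3]
    have harg : ((rest.length : Int) + 2) - 2 = (rest.length : Int) := by ring
    rw [harg]
    simp only [List.length_cons]
    ring

-- B's digit-count loop computes the decimal length
theorem pvCount_eq (m : Nat) (hm : 0 < m) :
    pvCount (m : Int) + 1 = ((Nat.digits 10 m).length : Int) := by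
  induction m using Nat.strong_induction_on with
  | _ m ih =>
    rw [Nat.digits_def' (by norm_num : 1 < 10) hm]
    by_cases h : m < 10
    · rw [pvCount, dif_neg (by exact_mod_cast Nat.not_le.mpr h : ¬ ((10:Int) ≤ (m:Int)))]
      have : m / 10 = 0 := Nat.div_eq_of_lt h
      rw [this]
      simp
    · rw [pvCount, dif_pos (by exact_mod_cast not_lt.mp h : (10:Int) ≤ (m:Int))]
      have e : PySem.Int.floordiv (m : Int) 10 = ((m / 10 : Nat) : Int) := by
        exact_mod_cast PySem.Int.floordiv_natCast m 10
      rw [e, ih (m / 10) (Nat.div_lt_self hm (by norm_num)) (by omega)]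
      simp

-- ===== VERDICT (by name: the statement is the Claim_ definition above) =====
theorem reverse_digits_in_pairs_spec : Claim_equal_reverse_digits_in_pairs := by
  unfold Claim_equal_reverse_digits_in_pairs
  intro number _ hpre
  unfold Spec_reverse_digits_in_pairs
  obtain ⟨m, rfl⟩ : ∃ m : Nat, number = (m : Int) :=
    ⟨number.toNat, (Int.toNat_of_nonneg hpre).symm⟩
  unfold reverse_digits_in_pairs reverse_digits_in_pairs_alt
  by_cases h0 : m = 0
  · subst h0
    have d1 : pvDigitsA (((0:Nat):Int).natAbs + 1) ((0:Nat):Int) = [] := by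
      simp [pvDigitsA]
    rw [d1, pvPopLoop]
    have c1 : pvCount ((0:Nat):Int) = 0 := by rw [pvCount]; norm_num
    rw [c1, pvSwap]
    have hnone : PySem.List.pop? ([] : List Int) = none := by decide
    norm_num
    split
    · rfl
    · rename_i fd rest heq
      rw [hnone] at heq
      cases heq
  · have hm : 0 < m := Nat.pos_of_ne_zero h0
    have hdig : pvDigitsA ((m:Int).natAbs + 1) (m:Int)
        = (Nat.digits 10 m).map (fun d : Nat => (d : Int)) := by
      apply pvDigitsA_eq
      rw [Int.natAbs_natCast]
      omega
    rw [hdig]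
    rw [pvPopLoop_eq_foldPairs ((Nat.digits 10 m).map (fun d : Nat => (d : Int))).length _ rfl 0]
    have hbound : ∀ d ∈ ((Nat.digits 10 m).map (fun d : Nat => (d : Int))).reverse,
        0 ≤ d ∧ d < 10 := by
      intro d hd
      rw [List.mem_reverse, List.mem_map] at hd
      obtain ⟨d0, hd0, rfl⟩ := hd
      have := Nat.digits_lt_base (by norm_num) hd0
      exact ⟨by positivity, by exact_mod_cast this⟩
    rw [pvFoldPairs_eq_swap _ 0 hbound]
    have hval : pvValBE ((Nat.digits 10 m).map (fun d : Nat => (d : Int))).reverse = (m : Int) := by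
      rw [← List.map_reverse, pvValBE_digits, Nat.ofDigits_digits]
    have hlen : ((((Nat.digits 10 m).map (fun d : Nat => (d : Int))).reverse.length : Nat) : Int)
        = pvCount (m : Int) + 1 := by
      rw [pvCount_eq m hm]
      simp
    rw [hval, hlen]
    ring
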